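-- pv_equiv track=rewrite | github.com/zimbrul-co/cubrid_db | django_cubrid/operations.py | _remove_relations_in_cycles
-- ===== SOURCE A (Python) =====
-- def _remove_relations_in_cycles(tables, relations):
--     def find_cycles(relations):
--         graph = {table: [] for table in tables}
--         for table_from, table_to in relations:
--             graph[table_from].append(table_to)
--
--         color = {u: "WHITE" for u in tables}
--         cycles = []
--
--         def dfs_visit(u, path):
--             color[u] = "GRAY"
--             path.append(u)
--             for v in graph[u]:
--                 if color[v] == "GRAY":  # Cycle detected
--                     cycle_start_index = path.index(v)
--                     cycles.append(path[cycle_start_index:].copy())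
--                 elif color[v] == "WHITE":
--                     dfs_visit(v, path)
--             path.pop()
--             color[u] = "BLACK"
--
--         for u in tables:
--             if color[u] == "WHITE":
--                 dfs_visit(u, [])
--
--         return cycles
--
--     cycles = find_cycles(relations)
--     relations_to_remove = {tuple(cycle[i:i+2]) for cycle in cycles for i in range(len(cycle)-1)}
--     relations_to_remove.update({(cycle[-1], cycle[0]) for cycle in cycles})  # Close the cycles
--
--     # Remove all relations that are part of any cycle
--     filtered_relations = [r for r in relations if r not in relations_to_remove]
--
--     return filtered_relations
-- ===== SOURCE B (Python) =====
-- def _remove_relations_in_cycles(tables, relations):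
--     # Iterative DFS with an explicit frame stack instead of recursion;
--     # graph building, coloring and the final edge-set/filter logic are unchanged.
--     graph = {table: [] for table in tables}
--     for table_from, table_to in relations:
--         graph[table_from].append(table_to)
--
--     color = {u: "WHITE" for u in tables}
--     cycles = []
--
--     for start in tables:
--         if color[start] != "WHITE":
--             continue
--         color[start] = "GRAY"
--         path = [start]
--         stack = [(start, 0)]
--         while stack:
--             u, i = stack[-1]
--             neighbors = graph[u]
--             if i < len(neighbors):
--                 stack[-1] = (u, i + 1)
--                 v = neighbors[i]
--                 if color[v] == "GRAY":  # Cycle detected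
--                     cycles.append(path[path.index(v):].copy())
--                 elif color[v] == "WHITE":
--                     color[v] = "GRAY"
--                     path.append(v)
--                     stack.append((v, 0))
--             else:
--                 stack.pop()
--                 path.pop()
--                 color[u] = "BLACK"
--
--     relations_to_remove = {tuple(cycle[i:i+2]) for cycle in cycles for i in range(len(cycle)-1)}
--     relations_to_remove.update({(cycle[-1], cycle[0]) for cycle in cycles})  # Close the cycles
--
--     # Remove all relations that are part of any cycle
--     filtered_relations = [r for r in relations if r not in relations_to_remove]
--
--     return filtered_relations
-- ===== Notes on version B (the rewrite author's own statement) =====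
-- stated objective: alternative
-- what changed: The recursive dfs_visit is replaced by an iterative DFS driven by an explicit stack of (node, next-neighbor-index) frames; graph building, coloring and the final edge-set/filter stage are unchanged.
import Mathlib
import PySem

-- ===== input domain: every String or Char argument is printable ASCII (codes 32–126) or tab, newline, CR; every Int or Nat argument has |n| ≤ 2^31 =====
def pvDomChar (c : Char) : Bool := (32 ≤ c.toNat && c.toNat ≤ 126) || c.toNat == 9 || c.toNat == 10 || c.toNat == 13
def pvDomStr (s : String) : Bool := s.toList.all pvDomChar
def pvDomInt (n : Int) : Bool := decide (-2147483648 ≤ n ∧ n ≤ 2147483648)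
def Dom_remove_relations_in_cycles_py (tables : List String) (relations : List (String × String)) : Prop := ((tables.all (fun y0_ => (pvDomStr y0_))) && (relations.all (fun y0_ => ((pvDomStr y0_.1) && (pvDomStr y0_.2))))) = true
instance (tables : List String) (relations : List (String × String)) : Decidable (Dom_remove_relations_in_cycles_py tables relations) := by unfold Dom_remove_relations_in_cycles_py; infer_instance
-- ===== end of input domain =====

-- B replaces A's recursive dfs_visit by an explicit-stack iterative DFS (same graph building,
-- coloring and final edge-set/filter stage); equal return value is proved on Pre_.

-- ===== PORT A =====
-- DFS state: the three mutable objects of the Python (color dict, cycles list, current path).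
structure DfsSt where
  color : PySem.Dict String String
  cycles : List (List String)
  path : List String
deriving Repr, DecidableEq

-- color lookup color[u]; total form of the dict access (Pre_ keeps every looked-up key present)
def pvCol (c : PySem.Dict String String) (u : String) : String :=
  (PySem.Dict.get? c u).getD ""

-- color[u] = "GRAY"; path.append(u)   (identical line in A and B)
def pvMark (u : String) (s : DfsSt) : DfsSt :=
  ⟨PySem.Dict.insert s.color u "GRAY", s.cycles, s.path ++ [u]⟩

-- path.pop(); color[u] = "BLACK"   (identical line in A and B)
def pvFinish (u : String) (s : DfsSt) : DfsSt :=
  ⟨PySem.Dict.insert s.color u "BLACK", s.cycles, s.path.dropLast⟩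

-- cycles.append(path[path.index(v):].copy())   (identical line in A and B; v is GRAY hence on the
-- path, so the .getD 0 default of index? is never used)
def pvRecordCycle (s : DfsSt) (v : String) : DfsSt :=
  { s with cycles := s.cycles ++ [PySem.List.slice s.path (some ((PySem.List.index? s.path v).getD 0 : Nat)) none] }

-- graph = {t: [] for t in tables}; for (a, b) in relations: graph[a].append(b)
-- (identical lines in A and B; on a key absent from tables Python raises KeyError — excluded by Pre_)
def pvBuildGraph (tables : List String) (relations : List (String × String)) : PySem.Dict String (List String) :=
  relations.foldl (fun g p => PySem.Dict.modify g p.1 [] (fun l => l ++ [p.2]))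
    (tables.foldl (fun g t => PySem.Dict.insert g t []) PySem.Dict.empty)

-- color = {u: "WHITE" for u in tables}   (identical line in A and B)
def pvColorInit (tables : List String) : PySem.Dict String String :=
  tables.foldl (fun c u => PySem.Dict.insert c u "WHITE") PySem.Dict.empty

-- the final edge-set construction and filter (the last four statements, identical in A and B);
-- tuple(cycle[i:i+2]) is ported as the pair (cycle[i], cycle[i+1]) — exact, since 0 ≤ i ≤ len-2;
-- the set is only used for membership tests, so Python's set iteration order is irrelevant.
def pvFilterCycles (cycles : List (List String)) (relations : List (String × String)) : List (String × String) :=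
  let rem1 : PySem.Set (String × String) :=
    PySem.Set.ofList (cycles.flatMap (fun cyc =>
      (PySem.List.pyRange 0 ((cyc.length : Int) - 1) 1).map
        (fun i => (PySem.List.pyGetD cyc i "", PySem.List.pyGetD cyc (i + 1) ""))))
  let rem2 := PySem.Set.update rem1 (cycles.map (fun cyc => (PySem.List.pyGetD cyc (-1) "", PySem.List.pyGetD cyc 0 "")))
  relations.filter (fun r => !(PySem.Set.contains rem2 r))

-- A's recursive dfs_visit; the Nat argument is a recursion-depth fuel, never exhausted for the
-- fuel tables.length + 1 passed at the top (the GRAY chain is duplicate-free).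
mutual
def pvDfsVisit (graph : PySem.Dict String (List String)) (n : Nat) (u : String) (s : DfsSt) : DfsSt :=
  match n with
  | 0 => s
  | n + 1 => pvFinish u (pvDfsNeighbors graph n (PySem.Dict.getD graph u []) (pvMark u s))
termination_by (n, 0)

def pvDfsNeighbors (graph : PySem.Dict String (List String)) (n : Nat) (vs : List String) (s : DfsSt) : DfsSt :=
  match vs with
  | [] => s
  | v :: rest =>
    pvDfsNeighbors graph n rest
      (if pvCol s.color v == "GRAY" then pvRecordCycle s v
       else if pvCol s.color v == "WHITE" then pvDfsVisit graph n v s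
       else s)
termination_by (n, vs.length + 1)
end

def remove_relations_in_cycles_py (tables : List String) (relations : List (String × String)) : List (String × String) :=
  let graph := pvBuildGraph tables relations
  let s0 : DfsSt := ⟨pvColorInit tables, [], []⟩
  let sF := tables.foldl
    (fun s u => if pvCol s.color u == "WHITE" then pvDfsVisit graph (tables.length + 1) u ⟨s.color, s.cycles, []⟩ else s) s0
  pvFilterCycles sF.cycles relations

-- ===== PORT B =====
-- Source B's while-loop over the explicit frame stack (top of stack = head of the list); the Nat
-- argument is a fuel bounding the number of iterations, proved sufficient below (pvMain/pvOuter)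
-- for the fuel (relations.length + 1) * (tables.length + 1) + 1 the port passes, so the port is exact.
def pvLoop (graph : PySem.Dict String (List String)) (fuel : Nat) (stack : List (String × Nat)) (s : DfsSt) : DfsSt :=
  match fuel, stack with
  | 0, _ => s
  | _ + 1, [] => s
  | n + 1, (u, i) :: fs =>
    let ns := PySem.Dict.getD graph u []
    if i < ns.length then
      let v := ns.getD i ""
      if pvCol s.color v == "GRAY" then
        pvLoop graph n ((u, i + 1) :: fs) (pvRecordCycle s v)
      else if pvCol s.color v == "WHITE" then
        pvLoop graph n ((v, 0) :: (u, i + 1) :: fs) (pvMark v s)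
      else
        pvLoop graph n ((u, i + 1) :: fs) s
    else
      pvLoop graph n fs (pvFinish u s)

def remove_relations_in_cycles_py_alt (tables : List String) (relations : List (String × String)) : List (String × String) :=
  let graph := pvBuildGraph tables relations
  let fuel := (relations.length + 1) * (tables.length + 1) + 1
  let s0 : DfsSt := ⟨pvColorInit tables, [], []⟩
  let sF := tables.foldl
    (fun s start => if pvCol s.color start == "WHITE" then pvLoop graph fuel [(start, 0)] (pvMark start ⟨s.color, s.cycles, []⟩) else s) s0
  pvFilterCycles sF.cycles relations

-- ===== PRECONDITION & SPEC =====
-- Pre_ excludes exactly the inputs on which the Python A raises KeyError: a relation endpoint that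
-- is not in tables (graph[table_from] while building, or color[v] during the DFS).
def Pre_remove_relations_in_cycles_py (tables : List String) (relations : List (String × String)) : Prop :=
  ∀ p ∈ relations, p.1 ∈ tables ∧ p.2 ∈ tables

instance (tables : List String) (relations : List (String × String)) : Decidable (Pre_remove_relations_in_cycles_py tables relations) := by
  unfold Pre_remove_relations_in_cycles_py; infer_instance

def pvWitness_remove_relations_in_cycles_py : List String × (List (String × String)) :=
  (["a", "b", "c"], [("a", "b"), ("b", "a"), ("b", "c")])

def Spec_remove_relations_in_cycles_py (tables : List String) (relations : List (String × String)) (out : List (String × String)) : Prop := out = remove_relations_in_cycles_py_alt tables relations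
instance (tables : List String) (relations : List (String × String)) (out : List (String × String)) : Decidable (Spec_remove_relations_in_cycles_py tables relations out) := by unfold Spec_remove_relations_in_cycles_py; infer_instance

-- ===== CLAIM (what is proved, stated in full; the proofs are below) =====
def Claim_equal_remove_relations_in_cycles_py : Prop := ∀ (tables : List String) (relations : List (String × String)), Dom_remove_relations_in_cycles_py tables relations → Pre_remove_relations_in_cycles_py tables relations → Spec_remove_relations_in_cycles_py tables relations (remove_relations_in_cycles_py tables relations)

-- ===== LEMMAS AND PROOFS =====

-- number of WHITE entries of the color map, counted over tables (the loop-termination potential)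
def pvW (tables : List String) (c : PySem.Dict String String) : Nat :=
  tables.countP (fun t => pvCol c t == "WHITE")

lemma pvCol_insert (c : PySem.Dict String String) (u x t : String) :
    pvCol (PySem.Dict.insert c u x) t = if t = u then x else pvCol c t := by
  unfold pvCol; rw [PySem.Dict.get?_insert]; split <;> rfl

lemma pvW_insert_le (tables : List String) (c : PySem.Dict String String) (u x : String)
    (hx : x ≠ "WHITE") : pvW tables (PySem.Dict.insert c u x) ≤ pvW tables c := by
  unfold pvW
  apply List.countP_mono_left
  intro a _ h
  rw [pvCol_insert] at h
  split at h
  · exact absurd (eq_of_beq h) hx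
  · exact h

lemma pvW_mark_lt (tables : List String) (c : PySem.Dict String String) (v : String)
    (hv : v ∈ tables) (hw : pvCol c v == "WHITE") :
    pvW tables (PySem.Dict.insert c v "GRAY") + 1 ≤ pvW tables c := by
  induction tables with
  | nil => cases hv
  | cons t ts ih =>
    simp only [pvW, List.countP_cons] at *
    by_cases htv : t = v
    · subst htv
      rw [pvCol_insert, if_pos rfl]
      have hmono := pvW_insert_le ts c t "GRAY" (by decide)
      unfold pvW at hmono
      have hw' : (pvCol c t == "WHITE") = true := hw
      simp only [hw', show (("GRAY" : String) == "WHITE") = false by decide]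
      simp only [Bool.false_eq_true, if_false, if_true]
      omega
    · rw [pvCol_insert, if_neg htv]
      have hv' : v ∈ ts := by
        rcases List.mem_cons.mp hv with h | h
        · exact absurd h.symm htv
        · exact h
      have := ih hv'
      omega

lemma pvW_pos (tables : List String) (c : PySem.Dict String String) (v : String)
    (hv : v ∈ tables) (hw : pvCol c v == "WHITE") : 1 ≤ pvW tables c := by
  unfold pvW
  exact List.countP_pos_iff.mpr ⟨v, hv, hw⟩

-- the DFS never repaints a node WHITE
lemma pvNeigh_nonwhite_of (graph : PySem.Dict String (List String)) (n : Nat)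
    (hvst : ∀ u s t, pvCol s.color t ≠ "WHITE" → pvCol (pvDfsVisit graph n u s).color t ≠ "WHITE") :
    ∀ vs s t, pvCol s.color t ≠ "WHITE" → pvCol (pvDfsNeighbors graph n vs s).color t ≠ "WHITE" := by
  intro vs
  induction vs with
  | nil => intro s t h; simpa [pvDfsNeighbors] using h
  | cons v rest ih =>
    intro s t h
    rw [pvDfsNeighbors]
    apply ih
    split
    · exact h
    · split
      · exact hvst v s t h
      · exact h

lemma pvVisit_nonwhite (graph : PySem.Dict String (List String)) :
    ∀ n u s t, pvCol s.color t ≠ "WHITE" → pvCol (pvDfsVisit graph n u s).color t ≠ "WHITE" := by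
  intro n
  induction n with
  | zero => intro u s t h; simpa [pvDfsVisit] using h
  | succ n ih =>
    intro u s t h
    rw [pvDfsVisit]
    simp only [pvFinish, pvCol_insert]
    split
    · decide
    · apply pvNeigh_nonwhite_of graph n ih
      simp only [pvMark, pvCol_insert]
      split
      · decide
      · exact h

lemma pvNeigh_nonwhite (graph : PySem.Dict String (List String)) (n : Nat) :
    ∀ vs s t, pvCol s.color t ≠ "WHITE" → pvCol (pvDfsNeighbors graph n vs s).color t ≠ "WHITE" :=
  pvNeigh_nonwhite_of graph n (pvVisit_nonwhite graph n)

lemma pvW_visit_le (graph : PySem.Dict String (List String)) (tables : List String) (n : Nat)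
    (u : String) (s : DfsSt) : pvW tables (pvDfsVisit graph n u s).color ≤ pvW tables s.color := by
  apply List.countP_mono_left
  intro a _ h
  by_contra hna
  exact pvVisit_nonwhite graph n u s a (fun hc => absurd (beq_iff_eq.mpr hc) (by simpa using hna)) (beq_iff_eq.mp h)

lemma pvW_neighbors_le (graph : PySem.Dict String (List String)) (tables : List String) (n : Nat)
    (vs : List String) (s : DfsSt) : pvW tables (pvDfsNeighbors graph n vs s).color ≤ pvW tables s.color := by
  apply List.countP_mono_left
  intro a _ h
  by_contra hna
  exact pvNeigh_nonwhite graph n vs s a (fun hc => absurd (beq_iff_eq.mpr hc) (by simpa using hna)) (beq_iff_eq.mp h)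

-- values of the initial {t: [] for t in tables} dict are all []
lemma pvInit_graph_empty (tables : List String) (u : String) :
    PySem.Dict.getD (tables.foldl (fun g t => PySem.Dict.insert g t ([] : List String)) PySem.Dict.empty) u [] = [] := by
  suffices h : ∀ (l : List String) (g : PySem.Dict String (List String)),
      (∀ w, PySem.Dict.getD g w [] = []) → ∀ w, PySem.Dict.getD (l.foldl (fun g t => PySem.Dict.insert g t []) g) w [] = [] by
    exact h tables PySem.Dict.empty (fun w => by simp [pysem]) u
  intro l
  induction l with
  | nil => intro g hg w; exact hg w
  | cons t ts ih =>
    intro g hg w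
    simp only [List.foldl_cons]
    apply ih
    intro w'
    rw [PySem.Dict.getD_insert]
    split
    · rfl
    · exact hg w'

lemma pvAppend_fold_len : ∀ (l : List (String × String)) (g : PySem.Dict String (List String)) (u : String),
    (PySem.Dict.getD (l.foldl (fun g p => PySem.Dict.modify g p.1 [] (fun xs => xs ++ [p.2])) g) u []).length
      ≤ (PySem.Dict.getD g u []).length + l.length := by
  intro l
  induction l with
  | nil => intro g u; simp
  | cons p ps ih =>
    intro g u
    simp only [List.foldl_cons, List.length_cons]
    refine le_trans (ih _ u) ?_
    rw [PySem.Dict.getD_modify]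
    split
    · next h => subst h; simp; omega
    · omega

-- every adjacency list of the built graph has length ≤ relations.length
lemma pvGraph_len (tables : List String) (relations : List (String × String)) (u : String) :
    (PySem.Dict.getD (pvBuildGraph tables relations) u []).length ≤ relations.length := by
  unfold pvBuildGraph
  refine le_trans (pvAppend_fold_len relations _ u) ?_
  rw [pvInit_graph_empty]
  simp

lemma pvAppend_fold_mem (C : String → Prop) : ∀ (l : List (String × String)) (g : PySem.Dict String (List String)),
    (∀ u v, v ∈ PySem.Dict.getD g u [] → C v) → (∀ p ∈ l, C p.2) →
    ∀ u v, v ∈ PySem.Dict.getD (l.foldl (fun g p => PySem.Dict.modify g p.1 [] (fun xs => xs ++ [p.2])) g) u [] → C v := by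
  intro l
  induction l with
  | nil => intro g hg _ u v hv; exact hg u v hv
  | cons p ps ih =>
    intro g hg hl u v hv
    simp only [List.foldl_cons] at hv
    refine ih _ ?_ (fun q hq => hl q (List.mem_cons_of_mem p hq)) u v hv
    intro u' v' hv'
    rw [PySem.Dict.getD_modify] at hv'
    split at hv'
    · rcases List.mem_append.mp hv' with h | h
      · exact hg p.1 v' h
      · rw [List.mem_singleton.mp h]
        exact hl p List.mem_cons_self
    · exact hg u' v' hv'

-- under Pre_, every neighbor in the built graph is a table
lemma pvGraph_mem (tables : List String) (relations : List (String × String))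
    (hPre : ∀ p ∈ relations, p.1 ∈ tables ∧ p.2 ∈ tables) (u v : String)
    (hv : v ∈ PySem.Dict.getD (pvBuildGraph tables relations) u []) : v ∈ tables := by
  unfold pvBuildGraph at hv
  refine pvAppend_fold_mem (fun w => w ∈ tables) relations _ ?_ (fun p hp => (hPre p hp).2) u v hv
  intro u' v' hv'
  rw [pvInit_graph_empty] at hv'
  cases hv'

lemma pvLoop_nil (graph : PySem.Dict String (List String)) (n : Nat) (s : DfsSt) :
    pvLoop graph n [] s = s := by
  cases n <;> rfl

-- MAIN SIMULATION: running the stack loop from a frame (u, i) on top performs exactly A's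
-- processing of the remaining neighbors of u followed by the pop/finish, in some number k of
-- iterations bounded by the drop in the potential (R+1)*pvW + remaining neighbors.
lemma pvMain (graph : PySem.Dict String (List String)) (tables : List String) (R : Nat)
    (hLen : ∀ u, (PySem.Dict.getD graph u []).length ≤ R)
    (hMem : ∀ u v, v ∈ PySem.Dict.getD graph u [] → v ∈ tables) :
    ∀ (t nA : Nat) (u : String) (i : Nat) (fs : List (String × Nat)) (s : DfsSt),
      (R + 1) * pvW tables s.color + ((PySem.Dict.getD graph u []).length - i) ≤ t →
      pvW tables s.color ≤ nA →
      ∃ k,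
        (k + (R + 1) * pvW tables (pvFinish u (pvDfsNeighbors graph nA ((PySem.Dict.getD graph u []).drop i) s)).color
            ≤ (R + 1) * pvW tables s.color + ((PySem.Dict.getD graph u []).length - i) + 1) ∧
        ∀ m, pvLoop graph (m + k) ((u, i) :: fs) s
            = pvLoop graph m fs (pvFinish u (pvDfsNeighbors graph nA ((PySem.Dict.getD graph u []).drop i) s)) := by
  intro t
  induction t using Nat.strong_induction_on with
  | _ t ih =>
  intro nA u i fs s hpot hnA
  by_cases hi : i < (PySem.Dict.getD graph u []).length
  case neg =>
    have hdrop : (PySem.Dict.getD graph u []).drop i = [] := List.drop_eq_nil_of_le (by omega)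
    refine ⟨1, ?_, ?_⟩
    · rw [hdrop]
      have h1 : pvW tables (pvFinish u (pvDfsNeighbors graph nA [] s)).color ≤ pvW tables s.color := by
        simp only [pvDfsNeighbors, pvFinish]
        exact pvW_insert_le tables s.color u "BLACK" (by decide)
      have h1' := Nat.mul_le_mul_left (R + 1) h1
      omega
    · intro m
      rw [hdrop]
      simp only [pvLoop, pvDfsNeighbors]
      rw [if_neg hi]
  case pos =>
    have hvd : (PySem.Dict.getD graph u []).getD i "" = (PySem.Dict.getD graph u [])[i] :=
      List.getD_eq_getElem _ _ hi
    set v := (PySem.Dict.getD graph u [])[i] with hv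
    have hdrop : (PySem.Dict.getD graph u []).drop i = v :: (PySem.Dict.getD graph u []).drop (i + 1) :=
      List.drop_eq_getElem_cons hi
    by_cases hg : (pvCol s.color v == "GRAY") = true
    · -- GRAY neighbor: record the cycle, advance the index
      have hrc : (pvRecordCycle s v).color = s.color := rfl
      obtain ⟨k, hk, he⟩ := ih (t - 1) (by omega) nA u (i + 1) fs (pvRecordCycle s v)
        (by rw [hrc]; omega) (by rw [hrc]; omega)
      have hAside : pvDfsNeighbors graph nA ((PySem.Dict.getD graph u []).drop i) s
          = pvDfsNeighbors graph nA ((PySem.Dict.getD graph u []).drop (i + 1)) (pvRecordCycle s v) := by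
        rw [hdrop]
        simp only [pvDfsNeighbors]
        rw [if_pos hg]
      refine ⟨k + 1, ?_, ?_⟩
      · rw [hrc] at hk
        rw [hAside]
        omega
      · intro m
        have harith : m + (k + 1) = (m + k) + 1 := by omega
        have hstep : pvLoop graph (m + (k + 1)) ((u, i) :: fs) s
            = pvLoop graph (m + k) ((u, i + 1) :: fs) (pvRecordCycle s v) := by
          rw [harith]
          simp only [pvLoop]
          rw [if_pos hi, hvd, if_pos hg]
        rw [hstep, he m, hAside]
    · by_cases hw : (pvCol s.color v == "WHITE") = true
      · -- WHITE neighbor: push a frame for it (A recurses into it)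
        have hvt : v ∈ tables := hMem u v (List.getElem_mem hi)
        have hWpos : 1 ≤ pvW tables s.color := pvW_pos tables s.color v hvt hw
        obtain ⟨nA', rfl⟩ : ∃ m', nA = m' + 1 := ⟨nA - 1, by omega⟩
        have hmark' : pvW tables (pvMark v s).color + 1 ≤ pvW tables s.color := by
          simpa [pvMark] using pvW_mark_lt tables s.color v hvt hw
        have hmul : (R + 1) * pvW tables (pvMark v s).color + (R + 1) ≤ (R + 1) * pvW tables s.color := by
          have := Nat.mul_le_mul_left (R + 1) hmark'
          rwa [Nat.mul_succ] at this
        have hlenv := hLen v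
        obtain ⟨kc, hkc, hec⟩ := ih (t - 1) (by omega) nA' v 0 ((u, i + 1) :: fs) (pvMark v s)
          (by omega) (by omega)
        have hS1 : pvDfsVisit graph (nA' + 1) v s
            = pvFinish v (pvDfsNeighbors graph nA' ((PySem.Dict.getD graph v []).drop 0) (pvMark v s)) := by
          simp only [pvDfsVisit, List.drop_zero]
        have hWS1a : pvW tables (pvFinish v (pvDfsNeighbors graph nA' ((PySem.Dict.getD graph v []).drop 0) (pvMark v s))).color
            ≤ pvW tables (pvMark v s).color := by
          have h1 := pvW_neighbors_le graph tables nA' ((PySem.Dict.getD graph v []).drop 0) (pvMark v s)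
          have h2 : pvW tables (pvFinish v (pvDfsNeighbors graph nA' ((PySem.Dict.getD graph v []).drop 0) (pvMark v s))).color
              ≤ pvW tables (pvDfsNeighbors graph nA' ((PySem.Dict.getD graph v []).drop 0) (pvMark v s)).color :=
            pvW_insert_le tables _ v "BLACK" (by decide)
          exact le_trans h2 h1
        have hmulS1 : (R + 1) * pvW tables (pvFinish v (pvDfsNeighbors graph nA' ((PySem.Dict.getD graph v []).drop 0) (pvMark v s))).color
            ≤ (R + 1) * pvW tables (pvMark v s).color := Nat.mul_le_mul_left _ hWS1a
        obtain ⟨kr, hkr, her⟩ := ih (t - 1) (by omega) (nA' + 1) u (i + 1) fs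
          (pvFinish v (pvDfsNeighbors graph nA' ((PySem.Dict.getD graph v []).drop 0) (pvMark v s)))
          (by omega) (by omega)
        have hAside : pvDfsNeighbors graph (nA' + 1) ((PySem.Dict.getD graph u []).drop i) s
            = pvDfsNeighbors graph (nA' + 1) ((PySem.Dict.getD graph u []).drop (i + 1))
                (pvFinish v (pvDfsNeighbors graph nA' ((PySem.Dict.getD graph v []).drop 0) (pvMark v s))) := by
          rw [hdrop]
          simp only [pvDfsNeighbors]
          rw [if_neg hg, if_pos hw, hS1]
        refine ⟨kc + kr + 1, ?_, ?_⟩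
        · rw [hAside]
          omega
        · intro m
          have harith : m + (kc + kr + 1) = ((m + kr) + kc) + 1 := by omega
          have hstep : pvLoop graph (m + (kc + kr + 1)) ((u, i) :: fs) s
              = pvLoop graph ((m + kr) + kc) ((v, 0) :: (u, i + 1) :: fs) (pvMark v s) := by
            rw [harith]
            simp only [pvLoop]
            rw [if_pos hi, hvd, if_neg hg, if_pos hw]
          rw [hstep, hec (m + kr), her m, hAside]
      · -- BLACK (or other) neighbor: just advance the index
        obtain ⟨k, hk, he⟩ := ih (t - 1) (by omega) nA u (i + 1) fs s (by omega) hnA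
        have hAside : pvDfsNeighbors graph nA ((PySem.Dict.getD graph u []).drop i) s
            = pvDfsNeighbors graph nA ((PySem.Dict.getD graph u []).drop (i + 1)) s := by
          rw [hdrop]
          simp only [pvDfsNeighbors]
          rw [if_neg hg, if_neg hw]
        refine ⟨k + 1, ?_, ?_⟩
        · rw [hAside]
          omega
        · intro m
          have harith : m + (k + 1) = (m + k) + 1 := by omega
          have hstep : pvLoop graph (m + (k + 1)) ((u, i) :: fs) s
              = pvLoop graph (m + k) ((u, i + 1) :: fs) s := by
            rw [harith]
            simp only [pvLoop]
            rw [if_pos hi, hvd, if_neg hg, if_neg hw]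
          rw [hstep, he m, hAside]

-- the two outer loops over tables agree
lemma pvOuter (graph : PySem.Dict String (List String)) (tables : List String) (R : Nat)
    (hLen : ∀ u, (PySem.Dict.getD graph u []).length ≤ R)
    (hMem : ∀ u v, v ∈ PySem.Dict.getD graph u [] → v ∈ tables) :
    ∀ (ts : List String) (s : DfsSt), (∀ u ∈ ts, u ∈ tables) →
      pvW tables s.color ≤ tables.length →
      ts.foldl (fun s u => if pvCol s.color u == "WHITE" then pvDfsVisit graph (tables.length + 1) u ⟨s.color, s.cycles, []⟩ else s) s
      = ts.foldl (fun s start => if pvCol s.color start == "WHITE" then pvLoop graph ((R + 1) * (tables.length + 1) + 1) [(start, 0)] (pvMark start ⟨s.color, s.cycles, []⟩) else s) s := by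
  intro ts
  induction ts with
  | nil => intro s _ _; rfl
  | cons u ts ih =>
    intro s hts hW
    simp only [List.foldl_cons]
    by_cases hu : (pvCol s.color u == "WHITE") = true
    · rw [if_pos hu, if_pos hu]
      have hut : u ∈ tables := hts u List.mem_cons_self
      have hucol : (pvCol (DfsSt.mk s.color s.cycles []).color u == "WHITE") = true := hu
      have hmark' : pvW tables (pvMark u ⟨s.color, s.cycles, []⟩).color + 1 ≤ pvW tables s.color := by
        simpa [pvMark] using pvW_mark_lt tables s.color u hut hu
      obtain ⟨k, hk, he⟩ := pvMain graph tables R hLen hMem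
        ((R + 1) * pvW tables (pvMark u ⟨s.color, s.cycles, []⟩).color + R) tables.length u 0 []
        (pvMark u ⟨s.color, s.cycles, []⟩)
        (by have := hLen u; omega) (by omega)
      have hkF : k ≤ (R + 1) * (tables.length + 1) + 1 := by
        have hmulW : (R + 1) * pvW tables (pvMark u ⟨s.color, s.cycles, []⟩).color ≤ (R + 1) * tables.length :=
          Nat.mul_le_mul_left _ (by omega)
        have hFexp : (R + 1) * (tables.length + 1) = (R + 1) * tables.length + (R + 1) := Nat.mul_succ _ _
        have := hLen u
        omega
      have key : pvDfsVisit graph (tables.length + 1) u ⟨s.color, s.cycles, []⟩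
          = pvLoop graph ((R + 1) * (tables.length + 1) + 1) [(u, 0)] (pvMark u ⟨s.color, s.cycles, []⟩) := by
        have h1 := he ((R + 1) * (tables.length + 1) + 1 - k)
        rw [Nat.sub_add_cancel hkF, pvLoop_nil] at h1
        rw [h1]
        simp only [pvDfsVisit, List.drop_zero]
      rw [← key]
      apply ih
      · intro w hw; exact hts w (List.mem_cons_of_mem u hw)
      · have hvle := pvW_visit_le graph tables (tables.length + 1) u ⟨s.color, s.cycles, []⟩
        have hseq : pvW tables (DfsSt.mk s.color s.cycles []).color = pvW tables s.color := rfl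
        omega
    · rw [if_neg hu, if_neg hu]
      exact ih s (fun w hw => hts w (List.mem_cons_of_mem u hw)) hW

-- ===== VERDICT (by name: the statement is the Claim_ definition above) =====
theorem remove_relations_in_cycles_py_spec : Claim_equal_remove_relations_in_cycles_py := by
  intro tables relations _hDom hPre
  unfold Spec_remove_relations_in_cycles_py
  simp only [remove_relations_in_cycles_py, remove_relations_in_cycles_py_alt]
  rw [pvOuter (pvBuildGraph tables relations) tables relations.length
    (fun u => pvGraph_len tables relations u)
    (fun u v hv => pvGraph_mem tables relations hPre u v hv)
    tables ⟨pvColorInit tables, [], []⟩ (fun u hu => hu)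
    (by unfold pvW; apply List.countP_le_length)]
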